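-- pv_equiv track=rewrite | github.com/NathanMacDiarmid/ECOR-1051-Module-1 | lab9.py | has22
-- ===== SOURCE A (Python) =====
-- def has22(lst3):
--     """
--     Return True if there are two 2's next to each other.
--     If not, it returns False.
--
--     >>> [1, 2, 2, 3]
--     True
--
--     >>> [2, 1, 2, 3]
--     False
--     """
--     count = 0
--     for num in lst3:
--         if num == 2:
--             count += 1
--             if count == 2:
--                 return True
--         else:
--             count = 0
--     else:
--         return False
-- ===== SOURCE B (Python) =====
-- def has22(lst3):
--     return any(a == 2 and b == 2 for a, b in zip(lst3, lst3[1:]))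
-- ===== Notes on version B (the rewrite author's own statement) =====
-- stated objective: idiomatic
-- what changed: Replaced the reset-on-miss running counter with a stateless adjacent-pair scan via zip(lst3, lst3[1:]) and any().
import Mathlib
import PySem

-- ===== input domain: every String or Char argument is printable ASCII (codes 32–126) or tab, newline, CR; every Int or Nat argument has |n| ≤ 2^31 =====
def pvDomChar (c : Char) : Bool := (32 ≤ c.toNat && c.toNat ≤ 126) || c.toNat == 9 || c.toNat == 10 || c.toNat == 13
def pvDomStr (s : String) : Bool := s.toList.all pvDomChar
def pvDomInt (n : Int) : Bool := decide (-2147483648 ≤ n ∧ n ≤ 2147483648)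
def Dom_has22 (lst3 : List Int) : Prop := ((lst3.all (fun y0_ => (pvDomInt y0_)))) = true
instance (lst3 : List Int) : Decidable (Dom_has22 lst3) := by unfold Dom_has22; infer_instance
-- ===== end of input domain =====

-- B replaces A's reset-on-miss running counter with a stateless adjacent-pair scan (idiomatic; same cost).

-- ===== PORT A =====
-- A's for-loop over lst3 with the mutable counter, as structural recursion on the list.
def has22Loop : List Int → Int → Bool
  | [], _ => false
  | n :: t, count =>
    if n == 2 then
      if count + 1 == 2 then true else has22Loop t (count + 1)
    else has22Loop t 0

def has22 (lst3 : List Int) : Bool := has22Loop lst3 0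

-- ===== PORT B =====
-- zip(lst3, lst3[1:]) with any(a == 2 and b == 2)
def has22_alt (lst3 : List Int) : Bool :=
  (lst3.zip (PySem.List.slice lst3 (some 1) none)).any (fun p => p.1 == 2 && p.2 == 2)

-- ===== PRECONDITION & SPEC =====
def Spec_has22 (lst3 : List Int) (out : Bool) : Prop := out = has22_alt lst3
instance (lst3 : List Int) (out : Bool) : Decidable (Spec_has22 lst3 out) := by unfold Spec_has22; infer_instance

-- ===== CLAIM (what is proved, stated in full; the proofs are below) =====
def Claim_equal_has22 : Prop := ∀ (lst3 : List Int), Dom_has22 lst3 → Spec_has22 lst3 (has22 lst3)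

-- ===== LEMMAS AND PROOFS =====
theorem slice_from_one (l : List Int) : PySem.List.slice l (some 1) none = l.tail :=
  PySem.List.slice_from_one l

theorem alt_cons (x : Int) (t : List Int) :
    has22_alt (x :: t) = ((x == 2 && (t.head?.getD 3 == 2)) || has22_alt t) := by
  cases t with
  | nil => simp [has22_alt, slice_from_one]
  | cons y t' => simp [has22_alt, slice_from_one, List.zip]

-- Joint invariant for A's loop at the two counter values it can reach.
theorem loop_char (l : List Int) :
    has22Loop l 0 = has22_alt l ∧
    has22Loop l 1 = ((l.head?.getD 3 == 2) || has22_alt l) := by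
  induction l with
  | nil => simp [has22Loop, has22_alt, slice_from_one]
  | cons x t ih =>
    constructor
    · by_cases hx : x = 2
      · subst hx
        simp [has22Loop, alt_cons, ih.2]
      · have hx' : (x == 2) = false := by simpa using hx
        simp [has22Loop, hx', alt_cons, ih.1]
    · by_cases hx : x = 2
      · subst hx; simp [has22Loop, alt_cons]
      · have hx' : (x == 2) = false := by simpa using hx
        simp [has22Loop, hx', alt_cons, ih.1]

-- ===== VERDICT (by name: the statement is the Claim_ definition above) =====
theorem has22_spec : Claim_equal_has22 := by
  intro lst3 _
  unfold Spec_has22 has22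
  exact (loop_char lst3).1
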